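-- pv_equiv track=rewrite | github.com/goodic/hw_regexp | main.py | remove_dub
-- ===== SOURCE A (Python) =====
-- def remove_dub(contacts_list):
--     contacts_list_res = []
--     for persona in contacts_list:
--         if len(contacts_list_res) < 1:
--             contacts_list_res.append(persona)
--         else:
--             match_flag = 0
--             for persona_res in contacts_list_res:
--                 if persona_res[0] == persona[0] and persona_res[1] == persona[1]:
--                     match_flag = 1
--                     for i in range(2, 7):
--                         if persona_res[i] != persona[i]:
--                             persona_res[i] = persona_res[i] + persona[i]
--             if match_flag == 0:
--                 contacts_list_res.append(persona)
--     return contacts_list_res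
-- ===== SOURCE B (Python) =====
-- def _merge(a, b):
--     return [a[i] + b[i] if 2 <= i < 7 and a[i] != b[i] else a[i]
--             for i in range(len(a))]
--
-- def remove_dub(contacts_list):
--     result = []
--     rest = contacts_list
--     while rest:
--         head = rest[0]
--         merged = head
--         others = []
--         for p in rest[1:]:
--             if p[0] == head[0] and p[1] == head[1]:
--                 merged = _merge(merged, p)
--             else:
--                 others.append(p)
--         result.append(merged)
--         rest = others
--     return result
-- ===== Notes on version B (the rewrite author's own statement) =====
-- stated objective: alternative
-- what changed: A filters each incoming contact against an ever-growing result list (online insertion/merge); B instead runs an outer loop over distinct keys: it takes the head of the remaining input, extracts and merges its whole (head[0], head[1]) group from the remainder in one sweep, emits the merged record, and repeats on the leftovers - it never rescans the output.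
import Mathlib
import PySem

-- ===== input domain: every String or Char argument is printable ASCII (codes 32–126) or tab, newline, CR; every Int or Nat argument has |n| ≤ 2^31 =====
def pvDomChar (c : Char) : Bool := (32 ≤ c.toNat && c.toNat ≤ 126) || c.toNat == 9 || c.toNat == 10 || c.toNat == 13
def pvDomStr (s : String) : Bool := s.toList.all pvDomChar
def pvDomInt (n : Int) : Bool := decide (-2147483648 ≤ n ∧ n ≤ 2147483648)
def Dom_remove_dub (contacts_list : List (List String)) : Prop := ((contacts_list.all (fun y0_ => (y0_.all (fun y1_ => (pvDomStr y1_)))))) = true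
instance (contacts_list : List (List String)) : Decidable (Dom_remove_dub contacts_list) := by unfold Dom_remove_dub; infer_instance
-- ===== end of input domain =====

-- B replaces A's online insertion (each contact is checked against the ever-growing result
-- list) by an outer loop over distinct keys: take the head of the remaining input, extract and
-- merge its whole (head[0], head[1]) group from the remainder in one sweep, emit it, recurse on
-- the leftovers (alternative decomposition; the output is never rescanned).
-- Note: Python A appends the caller's inner lists to its result and merges into them IN PLACE
-- (the caller can observe that); B builds fresh lists — the equivalence proved here is about the
-- RETURN value only.

-- ===== PORT A =====
-- xs[i] for a list of strings (Python raises where pyGet? is none; Pre_ keeps us where it is some)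
def pyg (l : List String) (i : Int) : String := (PySem.List.pyGet? l i).getD ""

-- the inner `for i in range(2, 7): if persona_res[i] != persona[i]: persona_res[i] += persona[i]`
def mergeStep (persona r : List String) (i : Int) : List String :=
  if pyg r i ≠ pyg persona i then r.set i.toNat (pyg r i ++ pyg persona i) else r

def mergeFields (r persona : List String) : List String :=
  (PySem.List.pyRange 2 7 1).foldl (mergeStep persona) r

-- the inner `for persona_res in contacts_list_res:` loop, carrying (updated result list, match_flag)
def scanStep (persona : List String) (acc : List (List String) × Bool) (pr : List String) :
    List (List String) × Bool :=
  if pyg pr 0 = pyg persona 0 ∧ pyg pr 1 = pyg persona 1 then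
    (acc.1 ++ [mergeFields pr persona], true)
  else (acc.1 ++ [pr], acc.2)

-- one iteration of the outer `for persona in contacts_list:` loop
def stepA (res : List (List String)) (persona : List String) : List (List String)  :=
  if res.length < 1 then res ++ [persona]
  else
    let s := res.foldl (scanStep persona) ([], false)
    if s.2 = false then s.1 ++ [persona] else s.1

def remove_dub (contacts_list : List (List String)) : List (List String) :=
  contacts_list.foldl stepA []

-- ===== PORT B =====
-- B's `_merge`: the comprehension [a[i]+b[i] if 2<=i<7 and a[i]!=b[i] else a[i] for i in range(len(a))]
def mergeB (a b : List String) : List String :=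
  (List.range a.length).map (fun (i : Nat) =>
    if 2 ≤ i ∧ i < 7 ∧ pyg a (i : Int) ≠ pyg b (i : Int) then pyg a (i : Int) ++ pyg b (i : Int)
    else pyg a (i : Int))

-- one iteration of B's inner `for p in rest[1:]:` sweep, carrying (merged, others)
def sweepStep (head : List String) (acc : List String × List (List String)) (p : List String) :
    List String × List (List String) :=
  if pyg p 0 = pyg head 0 ∧ pyg p 1 = pyg head 1 then (mergeB acc.1 p, acc.2)
  else (acc.1, acc.2 ++ [p])

def sweep (head : List String) (t : List (List String)) : List String × List (List String) :=
  t.foldl (sweepStep head) (head, [])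

-- the key both programs compare: (persona[0], persona[1])
def keyOf (p : List String) : String × String := (pyg p 0, pyg p 1)

-- closed form of one sweep (also needed by bLoop's termination proof, hence stated here)
theorem sweep_aux (head : List String) (t : List (List String)) :
    ∀ (m : List String) (acc : List (List String)),
      t.foldl (sweepStep head) (m, acc) =
        ((t.filter (fun p => decide (keyOf p = keyOf head))).foldl mergeB m,
         acc ++ t.filter (fun p => !decide (keyOf p = keyOf head))) := by
  induction t with
  | nil => intro m acc; simp
  | cons p t ih =>
      intro m acc
      have hiff : (pyg p 0 = pyg head 0 ∧ pyg p 1 = pyg head 1) ↔ keyOf p = keyOf head := by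
        unfold keyOf; rw [Prod.mk.injEq]
      rw [List.foldl_cons]
      by_cases h : keyOf p = keyOf head
      · rw [show sweepStep head (m, acc) p = (mergeB m p, acc) from by
            unfold sweepStep; rw [if_pos (hiff.mpr h)], ih]
        simp [h]
      · rw [show sweepStep head (m, acc) p = (m, acc ++ [p]) from by
            unfold sweepStep; rw [if_neg (fun hc => h (hiff.mp hc))], ih]
        simp [h]

theorem sweep_eq (head : List String) (t : List (List String)) :
    sweep head t =
      ((t.filter (fun p => decide (keyOf p = keyOf head))).foldl mergeB head,
       t.filter (fun p => !decide (keyOf p = keyOf head))) := by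
  unfold sweep; rw [sweep_aux]; simp

-- B's outer `while rest:` loop
def bLoop : List (List String) → List (List String)
  | [] => []
  | h :: t => (sweep h t).1 :: bLoop (sweep h t).2
termination_by l => l.length
decreasing_by
  rw [sweep_eq]
  simpa using Nat.lt_succ_of_le (List.length_filter_le _ t)

def remove_dub_alt (contacts_list : List (List String)) : List (List String) :=
  bLoop contacts_list

-- ===== PRECONDITION & SPEC =====
-- Pre_ excludes exactly the inputs on which Python A raises IndexError: with a second contact
-- present every contact's field 0 is read; two contacts agreeing on field 0 have fields 0-1
-- read; two contacts agreeing on fields 0-1 are merged, which reads fields 2..6 of both.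
def Pre_remove_dub (contacts_list : List (List String)) : Prop :=
  (contacts_list.length ≤ 1 ∨ ∀ p ∈ contacts_list, 1 ≤ p.length) ∧
  (∀ i : Fin contacts_list.length, ∀ j : Fin contacts_list.length, i < j →
    ((contacts_list.get i)[0]? = (contacts_list.get j)[0]? →
      2 ≤ (contacts_list.get i).length ∧ 2 ≤ (contacts_list.get j).length) ∧
    ((contacts_list.get i)[0]? = (contacts_list.get j)[0]? →
     (contacts_list.get i)[1]? = (contacts_list.get j)[1]? →
      7 ≤ (contacts_list.get i).length ∧ 7 ≤ (contacts_list.get j).length))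
instance (contacts_list : List (List String)) : Decidable (Pre_remove_dub contacts_list) := by
  unfold Pre_remove_dub; infer_instance

def pvWitness_remove_dub : List (List String) :=
  [["ann", "lee", "a", "b", "c", "d", "e"],
   ["bob", "fox", "1", "2", "3", "4", "5"],
   ["ann", "lee", "a", "x", "c", "y", "e"]]

def Spec_remove_dub (contacts_list : List (List String)) (out : List (List String)) : Prop := out = remove_dub_alt contacts_list
instance (contacts_list : List (List String)) (out : List (List String)) : Decidable (Spec_remove_dub contacts_list out) := by unfold Spec_remove_dub; infer_instance

-- ===== CLAIM (what is proved, stated in full; the proofs are below) =====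
def Claim_equal_remove_dub : Prop := ∀ (contacts_list : List (List String)), Dom_remove_dub contacts_list → Pre_remove_dub contacts_list → Spec_remove_dub contacts_list (remove_dub contacts_list)

-- ===== LEMMAS AND PROOFS =====

-- ---- the two merges agree elementwise ----

theorem pyg_lt (l : List String) (j : Nat) (h : j < l.length) : pyg l (j : Int) = l[j] := by
  simp [pyg, h]

theorem length_mergeStep (p r : List String) (i : Int) :
    (mergeStep p r i).length = r.length := by
  unfold mergeStep; split <;> simp

theorem getElem?_mergeStep (p r : List String) (i : Int) (hi : 0 ≤ i) (j : Nat) :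
    (mergeStep p r i)[j]? =
      if (j : Int) = i then
        (r[j]?).map (fun v => if v ≠ pyg p i then v ++ pyg p i else v)
      else r[j]? := by
  by_cases hji : (j : Int) = i
  · have hj' : i.toNat = j := by omega
    rw [if_pos hji]
    by_cases hr : j < r.length
    · have hv : pyg r i = r[j] := by rw [← hji]; exact pyg_lt r j hr
      unfold mergeStep
      by_cases hne : pyg r i ≠ pyg p i
      · rw [if_pos hne, hj', List.getElem?_set_self' ]
        simp [hr, hv, hv ▸ hne]
      · rw [if_neg hne]
        rw [not_not] at hne
        simp [hr, hv ▸ hne]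
    · have h1 : r[j]? = none := by
        rw [List.getElem?_eq_none_iff]; omega
      have h2 : (mergeStep p r i)[j]? = none := by
        rw [List.getElem?_eq_none_iff, length_mergeStep]; omega
      rw [h1, h2]; rfl
  · rw [if_neg hji]
    have hj' : i.toNat ≠ j := by omega
    unfold mergeStep
    split
    · exact List.getElem?_set_ne hj'
    · rfl

theorem getElem?_foldl_mergeStep (p : List String) :
    ∀ (is : List Int) (r : List String), is.Nodup → (∀ i ∈ is, 0 ≤ i) → ∀ j : Nat,
      (is.foldl (mergeStep p) r)[j]? =
        (r[j]?).map (fun v => if (j : Int) ∈ is ∧ v ≠ pyg p (j : Int) then v ++ pyg p (j : Int) else v) := by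
  intro is
  induction is with
  | nil =>
      intro r _ _ j
      simp
  | cons i t ih =>
      intro r hnd hpos j
      rw [List.foldl_cons,
          ih (mergeStep p r i) hnd.of_cons (fun x hx => hpos x (List.mem_cons_of_mem _ hx)) j,
          getElem?_mergeStep p r i (hpos i (List.mem_cons_self ..)) j]
      by_cases hji : (j : Int) = i
      · have hnotmem : (j : Int) ∉ t := by rw [hji]; exact (List.nodup_cons.mp hnd).1
        rw [if_pos hji, Option.map_map]
        cases r[j]? with
        | none => rfl
        | some v =>
            simp only [Option.map_some, Function.comp_apply]
            congr 1
            rw [if_neg (fun hc => hnotmem hc.1)]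
            have hmem : (j : Int) ∈ i :: t := by rw [hji]; exact List.mem_cons_self
            by_cases hv : v = pyg p (j : Int)
            · rw [if_neg (by rw [hji] at hv; simp [hv]), if_neg (by simp [hv])]
            · have hv' : v ≠ pyg p i := by rw [← hji]; exact hv
              rw [if_pos hv', if_pos ⟨hmem, hv⟩, hji]
      · rw [if_neg hji]
        cases r[j]? with
        | none => rfl
        | some v =>
            simp only [Option.map_some]
            congr 1
            have hmemiff : ((j : Int) ∈ i :: t) ↔ ((j : Int) ∈ t) := by
              rw [List.mem_cons]; exact or_iff_right hji
            simp only [hmemiff]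

theorem mergeFields_eq_mergeB (r p : List String) : mergeFields r p = mergeB r p := by
  have hR : PySem.List.pyRange 2 7 1 = [2, 3, 4, 5, 6] := by decide
  apply List.ext_getElem?
  intro j
  unfold mergeFields
  rw [hR, getElem?_foldl_mergeStep p [2,3,4,5,6] r (by decide) (by decide) j]
  unfold mergeB
  rw [List.getElem?_map]
  by_cases hj : j < r.length
  · have hr : r[j]? = some r[j] := List.getElem?_eq_getElem hj
    rw [hr, List.getElem?_range hj]
    simp only [Option.map_some]
    congr 1
    have hmem : ((j : Int) ∈ ([2, 3, 4, 5, 6] : List Int)) ↔ (2 ≤ j ∧ j < 7) := by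
      simp only [List.mem_cons, List.not_mem_nil, or_false]
      omega
    rw [pyg_lt r j hj]
    simp only [hmem]
    by_cases h1 : 2 ≤ j ∧ j < 7
    · by_cases h2 : r[j] ≠ pyg p (j : Int)
      · rw [if_pos ⟨h1, h2⟩, if_pos ⟨h1.1, h1.2, h2⟩]
      · rw [if_neg (fun hc => h2 hc.2), if_neg (fun hc => h2 hc.2.2)]
    · rw [if_neg (fun hc => h1 hc.1), if_neg (fun hc => h1 ⟨hc.1, hc.2.1⟩)]
  · have hr : r[j]? = none := by rw [List.getElem?_eq_none_iff]; omega
    have hrg : (List.range r.length)[j]? = none := by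
      rw [List.getElem?_eq_none_iff]; simpa using hj
    rw [hr, hrg]; rfl

-- ---- closed form of A's outer step ----

theorem keyOf_mergeStep (persona r : List String) (i : Int) (h : 2 ≤ i) :
    keyOf (mergeStep persona r i) = keyOf r := by
  have : ∀ (v : String) (n : Nat), 2 ≤ n → keyOf (r.set n v) = keyOf r := by
    intro v n hn
    have hne0 : n ≠ 0 := by omega
    have hne1 : n ≠ 1 := by omega
    unfold keyOf pyg
    simp [PySem.List.pyGet?, PySem.List.pyIdx?]
    constructor <;> split <;>
      simp [List.getElem?_set_ne hne0, List.getElem?_set_ne hne1]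
  unfold mergeStep
  split
  · exact this _ _ (by omega)
  · rfl

theorem keyOf_mergeFields (r persona : List String) :
    keyOf (mergeFields r persona) = keyOf r := by
  unfold mergeFields
  have : ∀ (is : List Int) (r : List String), (∀ i ∈ is, 2 ≤ i) →
      keyOf (is.foldl (mergeStep persona) r) = keyOf r := by
    intro is
    induction is with
    | nil => intro r _; rfl
    | cons i t ih =>
        intro r h
        simp only [List.foldl_cons]
        rw [ih _ (fun x hx => h x (List.mem_cons_of_mem _ hx)),
            keyOf_mergeStep _ _ _ (h i (List.mem_cons_self ..))]
  exact this _ r (fun i hi => ((PySem.List.mem_pyRange_one).mp hi).1)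

theorem scanStep_apply (persona : List String) (acc : List (List String)) (b : Bool)
    (r : List String) :
    scanStep persona (acc, b) r =
      if keyOf r = keyOf persona then (acc ++ [mergeFields r persona], true)
      else (acc ++ [r], b) := by
  have hiff : (pyg r 0 = pyg persona 0 ∧ pyg r 1 = pyg persona 1) ↔ keyOf r = keyOf persona := by
    unfold keyOf; rw [Prod.mk.injEq]
  unfold scanStep
  by_cases h : keyOf r = keyOf persona
  · rw [if_pos (hiff.mpr h), if_pos h]
  · rw [if_neg (fun hc => h (hiff.mp hc)), if_neg h]

theorem scan_eq (persona : List String) :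
    ∀ (res acc : List (List String)) (b : Bool),
      res.foldl (scanStep persona) (acc, b) =
        (acc ++ res.map (fun r => if keyOf r = keyOf persona then mergeFields r persona else r),
         b || res.any (fun r => decide (keyOf r = keyOf persona))) := by
  intro res
  induction res with
  | nil => intro acc b; simp
  | cons r t ih =>
      intro acc b
      rw [List.foldl_cons, scanStep_apply]
      by_cases h : keyOf r = keyOf persona
      · rw [if_pos h, ih]
        simp [h]
      · rw [if_neg h, ih]
        simp [h]

theorem stepA_closed (res : List (List String)) (p : List String) :
    stepA res p =
      if res.any (fun r => decide (keyOf r = keyOf p)) then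
        res.map (fun r => if keyOf r = keyOf p then mergeFields r p else r)
      else res ++ [p] := by
  unfold stepA
  cases res with
  | nil => simp
  | cons r t =>
      rw [if_neg (by simp), scan_eq]
      by_cases hany : ((r :: t).any fun x => decide (keyOf x = keyOf p)) = true
      · simp [hany]
      · simp only [Bool.not_eq_true] at hany
        have hmap : (r :: t).map (fun x => if keyOf x = keyOf p then mergeFields x p else x)
            = r :: t := by
          rw [List.map_congr_left (g := id) ?_, List.map_id]
          intro x hx
          have := List.any_eq_false.mp hany x hx
          simp only [decide_eq_true_eq] at this
          rw [if_neg this]; rfl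
        simp [hany, hmap]

theorem keys_stepA (res : List (List String)) (p : List String) :
    (stepA res p).map keyOf =
      if res.any (fun r => decide (keyOf r = keyOf p)) then res.map keyOf
      else res.map keyOf ++ [keyOf p] := by
  rw [stepA_closed]
  split
  · rw [List.map_map]
    apply List.map_congr_left
    intro r _
    simp only [Function.comp]
    by_cases h : keyOf r = keyOf p
    · rw [if_pos h, keyOf_mergeFields]
    · rw [if_neg h]
  · rw [List.map_append]; rfl

theorem nodup_keys_stepA (res : List (List String)) (p : List String)
    (hnd : (res.map keyOf).Nodup) : ((stepA res p).map keyOf).Nodup := by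
  rw [keys_stepA]
  split
  · exact hnd
  · rename_i hany
    simp only [Bool.not_eq_true] at hany
    have : keyOf p ∉ res.map keyOf := by
      intro hmem
      obtain ⟨r, hr, hk⟩ := List.mem_map.mp hmem
      have := List.any_eq_false.mp hany r hr
      simp only [decide_eq_true_eq] at this
      exact this hk
    rw [List.nodup_append]
    exact ⟨hnd, List.nodup_singleton _, by simpa using this⟩

theorem not_mem_keys_stepA (res : List (List String)) (p e : List String)
    (he : keyOf e ∉ res.map keyOf) (hpe : keyOf p ≠ keyOf e) :
    keyOf e ∉ (stepA res p).map keyOf := by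
  rw [keys_stepA]
  split
  · exact he
  · intro hmem
    rcases List.mem_append.mp hmem with h | h
    · exact he h
    · simp only [List.mem_singleton] at h
      exact hpe h.symm

theorem stepA_cons_of_ne (res : List (List String)) (p e : List String)
    (h : keyOf p ≠ keyOf e) : stepA (e :: res) p = e :: stepA res p := by
  rw [stepA_closed, stepA_closed]
  have hhead : (decide (keyOf e = keyOf p)) = false := by
    simp only [decide_eq_false_iff_not]
    exact fun hc => h hc.symm
  rw [List.any_cons, hhead, Bool.false_or, List.map_cons,
      if_neg (fun hc : keyOf e = keyOf p => h hc.symm)]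
  split <;> rfl

theorem stepA_cons_of_eq (res : List (List String)) (p e : List String)
    (h : keyOf p = keyOf e) (hndm : ∀ r ∈ res, keyOf r ≠ keyOf e) :
    stepA (e :: res) p = mergeFields e p :: res := by
  rw [stepA_closed]
  have hhead : (decide (keyOf e = keyOf p)) = true := by simp [h.symm]
  rw [List.any_cons, hhead, Bool.true_or, if_pos rfl, List.map_cons, if_pos h.symm]
  congr 1
  rw [List.map_congr_left (g := id) ?_, List.map_id]
  intro r hr
  rw [if_neg (fun hc : keyOf r = keyOf p => hndm r hr (hc.trans h))]
  rfl

-- ---- the grouping lemma: A's fold, started at e :: res with fresh keys in res, splits into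
-- the merged key-of-e group followed by A's fold on the non-matching remainder ----

theorem loopL (t : List (List String)) :
    ∀ (e : List String) (res : List (List String)),
      keyOf e ∉ res.map keyOf → (res.map keyOf).Nodup →
      t.foldl stepA (e :: res) =
        ((t.filter (fun p => decide (keyOf p = keyOf e))).foldl mergeFields e) ::
        ((t.filter (fun p => !decide (keyOf p = keyOf e))).foldl stepA res) := by
  induction t with
  | nil => intro e res _ _; rfl
  | cons p t ih =>
      intro e res he hnd
      rw [List.foldl_cons]
      by_cases hk : keyOf p = keyOf e
      · have hndm : ∀ r ∈ res, keyOf r ≠ keyOf e := by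
          intro r hr hc
          exact he (hc ▸ List.mem_map_of_mem hr)
        rw [stepA_cons_of_eq res p e hk hndm]
        have hih := ih (mergeFields e p) res
          (by rw [keyOf_mergeFields]; exact he) hnd
        simp only [keyOf_mergeFields] at hih
        rw [hih]
        simp [hk]
      · rw [stepA_cons_of_ne res p e hk,
            ih e (stepA res p) (not_mem_keys_stepA res p e he hk) (nodup_keys_stepA res p hnd)]
        simp [hk]

-- ---- main equivalence, by well-founded recursion on the input length ----

theorem foldA_eq_bLoop (l : List (List String)) : l.foldl stepA [] = bLoop l := by
  cases l with
  | nil => simp [bLoop]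
  | cons h t =>
      have hMB : mergeFields = mergeB := funext fun r => funext fun p => mergeFields_eq_mergeB r p
      have h0 : stepA [] h = [h] := rfl
      rw [List.foldl_cons, h0, loopL t h [] (by simp) List.nodup_nil,
          show bLoop (h :: t) = (sweep h t).1 :: bLoop (sweep h t).2 from by rw [bLoop],
          sweep_eq, hMB,
          foldA_eq_bLoop (t.filter (fun p => !decide (keyOf p = keyOf h)))]
termination_by l.length
decreasing_by simpa using Nat.lt_succ_of_le (List.length_filter_le _ t)

-- ===== VERDICT (by name: the statement is the Claim_ definition above) =====
theorem remove_dub_spec : Claim_equal_remove_dub := by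
  intro l _ _
  unfold Spec_remove_dub remove_dub remove_dub_alt
  exact foldA_eq_bLoop l
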